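-- pv_equiv track=rewrite | github.com/phdfinancecodyS/MikecodyRepo | ask-anyway-cody-handoff-2026-03-20-final/scripts/scaffold_chapter_guides.py | profile_for_title
-- ===== SOURCE A (Python) =====
-- def profile_for_title(title):
--     """Map title to psychological profile for drafting"""
--     low = title.lower()
--     if any(x in low for x in ["crisis", "suicid", "hopeless", "danger"]):
--         return "crisis"
--     elif any(x in low for x in ["anger", "rage", "blow", "short-fuse", "overreact"]):
--         return "reactivity"
--     elif any(x in low for x in ["sleep", "wake", "nightmare", "3am", "fatigue", "debt"]):
--         return "sleep"
--     elif any(x in low for x in ["parent", "family", "kid", "home", "relation", "partner", "couple"]):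
--         return "relationship"
--     elif any(x in low for x in ["moral", "shame", "guilt", "faith", "betrayal", "villain"]):
--         return "moral"
--     elif any(x in low for x in ["sex", "intimacy", "desire", "touch", "body image"]):
--         return "intimacy"
--     elif any(x in low for x in ["pain", "tension", "body", "migraine", "headache", "sense"]):
--         return "body"
--     elif any(x in low for x in ["scroll", "habit", "loop", "compul", "dopamine"]):
--         return "habit"
--     elif any(x in low for x in ["work", "identity", "job", "role", "meaning", "transition"]):
--         return "work"
--     else:
--         return "general"
-- ===== SOURCE B (Python) =====
-- _GROUPS = [
--     ("crisis", ["crisis", "suicid", "hopeless", "danger"]),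
--     ("reactivity", ["anger", "rage", "blow", "short-fuse", "overreact"]),
--     ("sleep", ["sleep", "wake", "nightmare", "3am", "fatigue", "debt"]),
--     ("relationship", ["parent", "family", "kid", "home", "relation", "partner", "couple"]),
--     ("moral", ["moral", "shame", "guilt", "faith", "betrayal", "villain"]),
--     ("intimacy", ["sex", "intimacy", "desire", "touch", "body image"]),
--     ("body", ["pain", "tension", "body", "migraine", "headache", "sense"]),
--     ("habit", ["scroll", "habit", "loop", "compul", "dopamine"]),
--     ("work", ["work", "identity", "job", "role", "meaning", "transition"]),
-- ]
--
-- # flat keyword index built once: keyword -> (priority rank, label)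
-- _KEYWORD_INDEX = {}
-- for _rank, (_label, _kws) in enumerate(_GROUPS):
--     for _kw in _kws:
--         _KEYWORD_INDEX[_kw] = (_rank, _label)
--
--
-- def profile_for_title(title):
--     """Map title to psychological profile for drafting"""
--     low = title.lower()
--     best = None
--     for kw, (rank, label) in _KEYWORD_INDEX.items():
--         if kw in low and (best is None or rank < best[0]):
--             best = (rank, label)
--     return best[1] if best else "general"
-- ===== Notes on version B (the rewrite author's own statement) =====
-- stated objective: alternative
-- what changed: Instead of a nine-branch if/elif chain with short-circuit group tests, B builds a flat keyword->(rank,label) index once and makes a single exhaustive pass over all 36 keywords computing the minimum-rank match (argmin), returning its label.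
import Mathlib
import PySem

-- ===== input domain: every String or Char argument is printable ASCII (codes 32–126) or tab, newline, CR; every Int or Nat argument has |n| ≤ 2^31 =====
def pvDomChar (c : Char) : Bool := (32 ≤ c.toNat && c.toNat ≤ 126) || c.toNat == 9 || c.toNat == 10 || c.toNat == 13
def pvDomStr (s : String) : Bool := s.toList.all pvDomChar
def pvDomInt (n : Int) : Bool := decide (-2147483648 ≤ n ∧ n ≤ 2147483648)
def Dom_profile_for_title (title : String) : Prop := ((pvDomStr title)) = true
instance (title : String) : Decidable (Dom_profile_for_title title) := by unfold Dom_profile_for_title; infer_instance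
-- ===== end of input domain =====

-- B replaces the if/elif chain by one exhaustive pass over a flat keyword->(rank,label) index, returning the label of the minimum-rank matching keyword (alternative decomposition; same cost).
-- ===== PORT A =====
-- helper for A's `any(x in low for x in [...])`
def pvAnyIn (low : String) (xs : List String) : Bool := xs.any (fun x => PySem.Str.isIn x low)

def profile_for_title (title : String) : String :=
  let low := PySem.Str.lower title
  if pvAnyIn low ["crisis", "suicid", "hopeless", "danger"] then "crisis"
  else if pvAnyIn low ["anger", "rage", "blow", "short-fuse", "overreact"] then "reactivity"
  else if pvAnyIn low ["sleep", "wake", "nightmare", "3am", "fatigue", "debt"] then "sleep"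
  else if pvAnyIn low ["parent", "family", "kid", "home", "relation", "partner", "couple"] then "relationship"
  else if pvAnyIn low ["moral", "shame", "guilt", "faith", "betrayal", "villain"] then "moral"
  else if pvAnyIn low ["sex", "intimacy", "desire", "touch", "body image"] then "intimacy"
  else if pvAnyIn low ["pain", "tension", "body", "migraine", "headache", "sense"] then "body"
  else if pvAnyIn low ["scroll", "habit", "loop", "compul", "dopamine"] then "habit"
  else if pvAnyIn low ["work", "identity", "job", "role", "meaning", "transition"] then "work"
  else "general"

-- ===== PORT B =====
-- Source B's _GROUPS table
def pvGroups : List (String × List String) :=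
  [("crisis", ["crisis", "suicid", "hopeless", "danger"]),
   ("reactivity", ["anger", "rage", "blow", "short-fuse", "overreact"]),
   ("sleep", ["sleep", "wake", "nightmare", "3am", "fatigue", "debt"]),
   ("relationship", ["parent", "family", "kid", "home", "relation", "partner", "couple"]),
   ("moral", ["moral", "shame", "guilt", "faith", "betrayal", "villain"]),
   ("intimacy", ["sex", "intimacy", "desire", "touch", "body image"]),
   ("body", ["pain", "tension", "body", "migraine", "headache", "sense"]),
   ("habit", ["scroll", "habit", "loop", "compul", "dopamine"]),
   ("work", ["work", "identity", "job", "role", "meaning", "transition"])]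

-- Source B's module-level index build: for rank,(label,kws) in enumerate(_GROUPS): for kw in kws: index[kw]=(rank,label)
-- (all 36 keywords are distinct, so the dict in insertion order is this flat association list)
def pvKeywordIndex : List (String × Int × String) :=
  (PySem.List.enumerate pvGroups).flatMap (fun e => e.2.2.map (fun kw => (kw, e.1, e.2.1)))

-- loop body: if kw in low and (best is None or rank < best[0]): best = (rank, label)
def pvStep (low : String) (best : Option (Int × String)) (e : String × Int × String) : Option (Int × String) :=
  if PySem.Str.isIn e.1 low &&
      (match best with | none => true | some p => decide (e.2.1 < p.1)) then some e.2 else best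

def profile_for_title_alt (title : String) : String :=
  let low := PySem.Str.lower title
  match pvKeywordIndex.foldl (pvStep low) none with
  | some p => p.2
  | none => "general"

-- ===== PRECONDITION & SPEC =====
def Spec_profile_for_title (title : String) (out : String) : Prop := out = profile_for_title_alt title
instance (title : String) (out : String) : Decidable (Spec_profile_for_title title out) := by unfold Spec_profile_for_title; infer_instance

-- ===== CLAIM (what is proved, stated in full; the proofs are below) =====
def Claim_equal_profile_for_title : Prop := ∀ (title : String), Dom_profile_for_title title → Spec_profile_for_title title (profile_for_title title)

-- ===== LEMMAS AND PROOFS =====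

-- first keyword match in a flat list (proof-only characterisation of B's fold)
def pvFirst (low : String) : List (String × Int × String) → Option (Int × String)
  | [] => none
  | e :: t => if PySem.Str.isIn e.1 low then some e.2 else pvFirst low t

theorem pvStep_absorb (low : String) (p : Int × String) (l : List (String × Int × String))
    (h : ∀ e ∈ l, ¬ e.2.1 < p.1) : l.foldl (pvStep low) (some p) = some p := by
  induction l with
  | nil => rfl
  | cons e t ih =>
      have he : ¬ e.2.1 < p.1 := h e (List.mem_cons_self ..)
      have hs : pvStep low (some p) e = some p := by
        simp [pvStep, he]
      rw [List.foldl_cons, hs]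
      exact ih (fun x hx => h x (List.mem_cons_of_mem _ hx))

theorem pvFold_eq_first (low : String) (l : List (String × Int × String))
    (h : l.Pairwise (fun a b => a.2.1 ≤ b.2.1)) :
    l.foldl (pvStep low) none = pvFirst low l := by
  induction l with
  | nil => rfl
  | cons e t ih =>
      rcases List.pairwise_cons.mp h with ⟨he, ht⟩
      by_cases hin : PySem.Str.isIn e.1 low = true
      · have hs : pvStep low none e = some e.2 := by
          simp [pvStep, PySem.Str.isIn] at hin ⊢; simp [hin]
        rw [List.foldl_cons, hs, pvFirst, if_pos hin]
        exact pvStep_absorb low e.2 t (fun x hx => not_lt.mpr (he x hx))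
      · have hs : pvStep low none e = none := by
          simp [pvStep, PySem.Str.isIn] at hin ⊢; simp [hin]
        rw [List.foldl_cons, hs, pvFirst, if_neg hin]
        exact ih ht

theorem pvFirst_group (low : String) (kws : List String) (r : Int) (lab : String)
    (rest : List (String × Int × String)) :
    pvFirst low (kws.map (fun k => (k, r, lab)) ++ rest)
      = if kws.any (fun k => PySem.Str.isIn k low) then some (r, lab) else pvFirst low rest := by
  induction kws with
  | nil => simp
  | cons k t ih =>
      by_cases hk : PySem.Str.isIn k low = true
      · simp [PySem.Str.isIn] at hk
        simp [pvFirst, PySem.Str.isIn, hk]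
      · simp [PySem.Str.isIn] at hk
        simp [pvFirst, PySem.Str.isIn, hk, ih]

theorem pvCore (low : String) :
    (if pvAnyIn low ["crisis", "suicid", "hopeless", "danger"] then "crisis"
     else if pvAnyIn low ["anger", "rage", "blow", "short-fuse", "overreact"] then "reactivity"
     else if pvAnyIn low ["sleep", "wake", "nightmare", "3am", "fatigue", "debt"] then "sleep"
     else if pvAnyIn low ["parent", "family", "kid", "home", "relation", "partner", "couple"] then "relationship"
     else if pvAnyIn low ["moral", "shame", "guilt", "faith", "betrayal", "villain"] then "moral"
     else if pvAnyIn low ["sex", "intimacy", "desire", "touch", "body image"] then "intimacy"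
     else if pvAnyIn low ["pain", "tension", "body", "migraine", "headache", "sense"] then "body"
     else if pvAnyIn low ["scroll", "habit", "loop", "compul", "dopamine"] then "habit"
     else if pvAnyIn low ["work", "identity", "job", "role", "meaning", "transition"] then "work"
     else "general")
    = (match pvKeywordIndex.foldl (pvStep low) none with
       | some p => p.2
       | none => "general") := by
  rw [pvFold_eq_first _ _ (by decide)]
  have hidx : pvKeywordIndex =
      (["crisis", "suicid", "hopeless", "danger"].map (fun k => (k, 0, "crisis"))) ++
      (["anger", "rage", "blow", "short-fuse", "overreact"].map (fun k => (k, 1, "reactivity"))) ++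
      (["sleep", "wake", "nightmare", "3am", "fatigue", "debt"].map (fun k => (k, 2, "sleep"))) ++
      (["parent", "family", "kid", "home", "relation", "partner", "couple"].map (fun k => (k, 3, "relationship"))) ++
      (["moral", "shame", "guilt", "faith", "betrayal", "villain"].map (fun k => (k, 4, "moral"))) ++
      (["sex", "intimacy", "desire", "touch", "body image"].map (fun k => (k, 5, "intimacy"))) ++
      (["pain", "tension", "body", "migraine", "headache", "sense"].map (fun k => (k, 6, "body"))) ++
      (["scroll", "habit", "loop", "compul", "dopamine"].map (fun k => (k, 7, "habit"))) ++
      (["work", "identity", "job", "role", "meaning", "transition"].map (fun k => (k, 8, "work"))) ++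
      ([] : List (String × Int × String)) := by
    decide
  rw [hidx]
  simp only [List.append_assoc, pvFirst_group, pvAnyIn, pvFirst]
  split_ifs <;> rfl

-- ===== VERDICT (by name: the statement is the Claim_ definition above) =====
theorem profile_for_title_spec : Claim_equal_profile_for_title := by
  intro title _
  show profile_for_title title = profile_for_title_alt title
  exact pvCore (PySem.Str.lower title)
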